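-- pv_equiv track=rewrite | github.com/CrysM28/algorithm-study | programmers/체육복.py | solution
-- ===== SOURCE A (Python) =====
-- def solution(n, lost, reserve):
--     # 체육복 멀쩡히 있는 애들
--     answer = n - len(lost)
--
--     # 왼쪽부터 빌려줘야 가장 많이 빌려줄 수 있음, 혹시 모르니 오름차순 정렬
--     lost.sort()
--     reserve.sort()
--
--     lost_tmp = lost[:]
--     reserve_tmp = reserve[:]
--
--     # 잃어버렸지만 여분 있는 애부터 걸러내기
--     for l in lost:
--         if l in reserve:
--             reserve_tmp.remove(l)
--             lost_tmp.remove(l)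
--             answer += 1
--
--     lost = lost_tmp[:]
--     reserve = reserve_tmp[:]
--
--     for l in lost:          # 잃어버린 애가 빌릴 수 있는 애
--         r1, r2 = l-1, l+1   # 앞뒤로 찾아보기
--         if r1 in reserve:
--             reserve.remove(r1)
--             answer += 1
--         elif r2 in reserve:
--             reserve.remove(r2)
--             answer += 1
--
--     return answer
-- ===== SOURCE B (Python) =====
-- def solution(n, lost, reserve):
--     # same observable in-place sorts as A (the greedy needs ascending order)
--     lost.sort()
--     reserve.sort()
--
--     # multiset difference: students who still need clothes / spares still available
--     rs = set(reserve)
--     lc = {}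
--     for l in lost:
--         lc[l] = lc.get(l, 0) + 1
--     lostp = [l for l in lost if l not in rs]
--     resp = []
--     used = {}
--     for r in reserve:
--         if used.get(r, 0) < lc.get(r, 0):
--             used[r] = used.get(r, 0) + 1
--         else:
--             resp.append(r)
--
--     # two-pointer merge over the two sorted lists instead of per-student lookups
--     matched = 0
--     i = j = 0
--     while i < len(lostp) and j < len(resp):
--         if resp[j] < lostp[i] - 1:
--             j += 1
--         elif resp[j] <= lostp[i] + 1:
--             matched += 1
--             i += 1
--             j += 1
--         else:
--             i += 1
--     return n - len(lostp) + matched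
-- ===== Notes on version B (the rewrite author's own statement) =====
-- stated objective: faster
-- what changed: Replaces A's per-student membership/remove greedy by counting-based multiset differences plus a single two-pointer merge over the two sorted lists, so no inner list scan or elif-lookup chain remains.
import Mathlib
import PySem

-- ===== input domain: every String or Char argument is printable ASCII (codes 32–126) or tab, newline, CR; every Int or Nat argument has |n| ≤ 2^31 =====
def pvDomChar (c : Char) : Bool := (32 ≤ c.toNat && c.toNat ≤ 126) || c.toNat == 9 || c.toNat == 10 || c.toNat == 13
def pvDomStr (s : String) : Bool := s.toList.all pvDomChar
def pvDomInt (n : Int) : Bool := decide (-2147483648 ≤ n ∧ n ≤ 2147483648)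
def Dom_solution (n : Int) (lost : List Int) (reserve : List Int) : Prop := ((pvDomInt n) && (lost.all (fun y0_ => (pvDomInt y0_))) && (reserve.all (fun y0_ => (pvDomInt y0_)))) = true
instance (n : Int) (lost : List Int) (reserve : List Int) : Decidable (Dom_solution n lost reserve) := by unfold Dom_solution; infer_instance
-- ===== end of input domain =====

-- B replaces A's per-student membership/remove greedy by counting-based multiset differences
-- plus one two-pointer merge of the two sorted lists; both sort lost/reserve in place
-- (the equivalence proved is about the RETURN value; B performs the same in-place sorts).

-- ===== PORT A =====
-- xs.remove(v); Python raises ValueError when v is absent — that case is outside Pre_solution, the port keeps xs unchanged there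
def pvRemoveD (xs : List Int) (v : Int) : List Int := (PySem.List.remove? xs v).getD xs

def solution (n : Int) (lost : List Int) (reserve : List Int) : Int :=
  let answer := n - (lost.length : Int)
  let lost1 := PySem.List.sorted lost (fun x => x) false
  let reserve1 := PySem.List.sorted reserve (fun x => x) false
  -- for l in lost: if l in reserve: reserve_tmp.remove(l); lost_tmp.remove(l); answer += 1
  let st1 := lost1.foldl (fun (st : List Int × List Int × Int) l =>
      if l ∈ reserve1 then (pvRemoveD st.1 l, pvRemoveD st.2.1 l, st.2.2 + 1) else st)
    (lost1, reserve1, answer)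
  -- for l in lost: r1, r2 = l-1, l+1; if r1 in reserve: … elif r2 in reserve: …
  let st2 := st1.1.foldl (fun (st : List Int × Int) l =>
      if (l - 1) ∈ st.1 then (pvRemoveD st.1 (l - 1), st.2 + 1)
      else if (l + 1) ∈ st.1 then (pvRemoveD st.1 (l + 1), st.2 + 1)
      else st)
    (st1.2.1, st1.2.2)
  st2.2

-- ===== PORT B =====
-- the while loop with indices i, j: structural recursion consuming the two sorted lists
def twoPtr : List Int → List Int → Int
  | [], _ => 0
  | _ :: _, [] => 0
  | l :: ls, r :: rs =>
    if r < l - 1 then twoPtr (l :: ls) rs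
    else if r ≤ l + 1 then 1 + twoPtr ls rs
    else twoPtr ls (r :: rs)
termination_by ls rs => ls.length + rs.length

def solution_alt (n : Int) (lost : List Int) (reserve : List Int) : Int :=
  let lost1 := PySem.List.sorted lost (fun x => x) false
  let reserve1 := PySem.List.sorted reserve (fun x => x) false
  let rs := PySem.Set.ofList reserve1
  -- lc[l] = lc.get(l, 0) + 1
  let lc := lost1.foldl (fun (d : PySem.Dict Int Int) l => d.insert l (d.getD l 0 + 1)) PySem.Dict.empty
  -- lostp = [l for l in lost if l not in rs]
  let lostp := lost1.filter (fun l => !(PySem.Set.contains rs l))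
  -- for r in reserve: if used.get(r,0) < lc.get(r,0): bump used else resp.append(r)
  let st := reserve1.foldl (fun (st : PySem.Dict Int Int × List Int) r =>
      if st.1.getD r 0 < lc.getD r 0 then (st.1.insert r (st.1.getD r 0 + 1), st.2)
      else (st.1, st.2 ++ [r])) (PySem.Dict.empty, ([] : List Int))
  n - (lostp.length : Int) + twoPtr lostp st.2

-- ===== PRECONDITION & SPEC =====
-- Pre_ excludes exactly the inputs on which A raises ValueError: some lost value also in reserve with more lost copies than reserve copies.
def Pre_solution (n : Int) (lost : List Int) (reserve : List Int) : Prop :=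
  ∀ v ∈ lost, v ∈ reserve → lost.count v ≤ reserve.count v
instance (n : Int) (lost : List Int) (reserve : List Int) : Decidable (Pre_solution n lost reserve) := by unfold Pre_solution; infer_instance
def pvWitness_solution : Int × List Int × List Int := (5, [2, 4], [1, 3, 5])

def Spec_solution (n : Int) (lost : List Int) (reserve : List Int) (out : Int) : Prop := out = solution_alt n lost reserve
instance (n : Int) (lost : List Int) (reserve : List Int) (out : Int) : Decidable (Spec_solution n lost reserve out) := by unfold Spec_solution; infer_instance

-- ===== CLAIM (what is proved, stated in full; the proofs are below) =====
def Claim_equal_solution : Prop := ∀ (n : Int) (lost : List Int) (reserve : List Int), Dom_solution n lost reserve → Pre_solution n lost reserve → Spec_solution n lost reserve (solution n lost reserve)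

-- ===== LEMMAS AND PROOFS =====

theorem pvRemoveD_cons_of_ne (r v : Int) (rt : List Int) (hne : r ≠ v) (hm : v ∈ rt) :
    pvRemoveD (r :: rt) v = r :: pvRemoveD rt v := by
  unfold pvRemoveD
  rw [PySem.List.remove?_cons_of_ne rt hne, PySem.List.remove?_eq_some_erase _ _ hm]
  rfl

theorem pvRemoveD_mem (rt : List Int) (v : Int) (hm : v ∈ rt) :
    pvRemoveD rt v = rt.erase v := by
  unfold pvRemoveD; rw [PySem.List.remove?_eq_some_erase _ _ hm]; rfl

-- a reserve value below every l-1 is carried along untouched by phase 2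
theorem a2_cons_small (r : Int) : ∀ (ls rt : List Int) (ans : Int), (∀ x ∈ ls, r < x - 1) →
    (ls.foldl (fun (st : List Int × Int) l =>
      if (l - 1) ∈ st.1 then (pvRemoveD st.1 (l - 1), st.2 + 1)
      else if (l + 1) ∈ st.1 then (pvRemoveD st.1 (l + 1), st.2 + 1)
      else st) (r :: rt, ans))
    = (r :: (ls.foldl (fun (st : List Int × Int) l =>
      if (l - 1) ∈ st.1 then (pvRemoveD st.1 (l - 1), st.2 + 1)
      else if (l + 1) ∈ st.1 then (pvRemoveD st.1 (l + 1), st.2 + 1)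
      else st) (rt, ans)).1,
      (ls.foldl (fun (st : List Int × Int) l =>
      if (l - 1) ∈ st.1 then (pvRemoveD st.1 (l - 1), st.2 + 1)
      else if (l + 1) ∈ st.1 then (pvRemoveD st.1 (l + 1), st.2 + 1)
      else st) (rt, ans)).2) := by
  intro ls
  induction ls with
  | nil => intro rt ans _; rfl
  | cons l ls ih =>
    intro rt ans hsm
    have hl : r < l - 1 := hsm l (by simp)
    have h1 : r ≠ l - 1 := by omega
    have h2 : r ≠ l + 1 := by omega
    have hm1 : ((l - 1) ∈ r :: rt) ↔ ((l - 1) ∈ rt) := by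
      constructor
      · intro h; rcases List.mem_cons.mp h with h | h
        · exact absurd h.symm h1
        · exact h
      · intro h; exact List.mem_cons_of_mem _ h
    have hm2 : ((l + 1) ∈ r :: rt) ↔ ((l + 1) ∈ rt) := by
      constructor
      · intro h; rcases List.mem_cons.mp h with h | h
        · exact absurd h.symm h2
        · exact h
      · intro h; exact List.mem_cons_of_mem _ h
    simp only [List.foldl_cons]
    by_cases hc1 : (l - 1) ∈ rt
    · rw [if_pos (hm1.mpr hc1), if_pos hc1, pvRemoveD_cons_of_ne r (l - 1) rt h1 hc1]
      exact ih _ _ (fun x hx => hsm x (by simp [hx]))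
    · rw [if_neg (fun h => hc1 (hm1.mp h)), if_neg hc1]
      by_cases hc2 : (l + 1) ∈ rt
      · rw [if_pos (hm2.mpr hc2), if_pos hc2, pvRemoveD_cons_of_ne r (l + 1) rt h2 hc2]
        exact ih _ _ (fun x hx => hsm x (by simp [hx]))
      · rw [if_neg (fun h => hc2 (hm2.mp h)), if_neg hc2]
        exact ih _ _ (fun x hx => hsm x (by simp [hx]))

theorem a2_nil_reserve : ∀ (ls : List Int) (ans : Int),
    (ls.foldl (fun (st : List Int × Int) l =>
      if (l - 1) ∈ st.1 then (pvRemoveD st.1 (l - 1), st.2 + 1)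
      else if (l + 1) ∈ st.1 then (pvRemoveD st.1 (l + 1), st.2 + 1)
      else st) (([] : List Int), ans)) = ([], ans) := by
  intro ls
  induction ls with
  | nil => intro ans; rfl
  | cons l ls ih => intro ans; simpa using ih ans

-- A's phase-2 greedy over sorted disjoint lists counts exactly the two-pointer matches
theorem phase2_eq_twoPtr : ∀ (ls rs : List Int), ls.Pairwise (· ≤ ·) → rs.Pairwise (· ≤ ·) →
    (∀ x ∈ ls, x ∉ rs) → ∀ ans : Int,
    (ls.foldl (fun (st : List Int × Int) l =>
      if (l - 1) ∈ st.1 then (pvRemoveD st.1 (l - 1), st.2 + 1)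
      else if (l + 1) ∈ st.1 then (pvRemoveD st.1 (l + 1), st.2 + 1)
      else st) (rs, ans)).2 = ans + twoPtr ls rs := by
  intro ls rs
  induction ls, rs using twoPtr.induct with
  | case1 rs => intro _ _ _ ans; simp [twoPtr]
  | case2 l ls => intro _ _ _ ans; rw [a2_nil_reserve]; simp [twoPtr]
  | case3 l ls r rs h ih =>
    intro hsl hsr hd ans
    have hall : ∀ x ∈ l :: ls, r < x - 1 := by
      intro x hx
      rcases List.mem_cons.mp hx with h' | h'
      · omega
      · have := (List.pairwise_cons.mp hsl).1 x h'; omega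
    have := congrArg Prod.snd (a2_cons_small r (l :: ls) rs ans hall)
    simp only [] at this
    rw [this, ih hsl (List.Pairwise.sublist (List.sublist_cons_self r rs) hsr)
        (fun x hx hmem => hd x hx (List.mem_cons_of_mem _ hmem)) ans]
    rw [twoPtr, if_pos h]
  | case4 l ls r rs h h2 ih =>
    intro hsl hsr hd ans
    have hrl : r ≠ l := fun he => hd l (by simp) (by simp [he])
    have hge : ∀ x ∈ rs, r ≤ x := (List.pairwise_cons.mp hsr).1
    simp only [List.foldl_cons]
    have hstep : ∀ v, (v = l - 1 ∧ r = l - 1) ∨ (v = l + 1 ∧ r = l + 1) →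
        pvRemoveD (r :: rs) v = rs := by
      intro v hv
      rcases hv with ⟨hv, hr⟩ | ⟨hv, hr⟩ <;>
        · subst hv; rw [← hr]; rw [pvRemoveD_mem _ _ (by simp), List.erase_cons_head]
    rcases (by omega : r = l - 1 ∨ r = l + 1) with hr | hr
    · rw [if_pos (show (l - 1) ∈ r :: rs by simp [hr]), hstep (l - 1) (Or.inl ⟨rfl, hr⟩)]
      rw [ih (List.Pairwise.sublist (List.sublist_cons_self l ls) hsl)
          (List.Pairwise.sublist (List.sublist_cons_self r rs) hsr)
          (fun x hx hmem => hd x (List.mem_cons_of_mem _ hx) (List.mem_cons_of_mem _ hmem)) (ans + 1)]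
      rw [twoPtr, if_neg h, if_pos h2]; ring
    · have hn1 : (l - 1) ∉ r :: rs := by
        intro hm
        rcases List.mem_cons.mp hm with h' | h'
        · omega
        · have := hge _ h'; omega
      rw [if_neg hn1, if_pos (show (l + 1) ∈ r :: rs by simp [hr]), hstep (l + 1) (Or.inr ⟨rfl, hr⟩)]
      rw [ih (List.Pairwise.sublist (List.sublist_cons_self l ls) hsl)
          (List.Pairwise.sublist (List.sublist_cons_self r rs) hsr)
          (fun x hx hmem => hd x (List.mem_cons_of_mem _ hx) (List.mem_cons_of_mem _ hmem)) (ans + 1)]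
      rw [twoPtr, if_neg h, if_pos h2]; ring
  | case5 l ls r rs h h2 ih =>
    intro hsl hsr hd ans
    have hge : ∀ x ∈ rs, r ≤ x := (List.pairwise_cons.mp hsr).1
    have hn1 : (l - 1) ∉ r :: rs := by
      intro hm
      rcases List.mem_cons.mp hm with h' | h'
      · omega
      · have := hge _ h'; omega
    have hn2 : (l + 1) ∉ r :: rs := by
      intro hm
      rcases List.mem_cons.mp hm with h' | h'
      · omega
      · have := hge _ h'; omega
    simp only [List.foldl_cons]
    rw [if_neg hn1, if_neg hn2]
    rw [ih (List.Pairwise.sublist (List.sublist_cons_self l ls) hsl) hsr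
        (fun x hx hmem => hd x (List.mem_cons_of_mem _ hx) hmem) ans]
    rw [twoPtr, if_neg h, if_neg h2]

-- A's phase 1: counts, sortedness and the answer after the exact-match pass
theorem phase1_inv (Rm : List Int) : ∀ (S lt rt : List Int) (ans : Int),
    lt.Pairwise (· ≤ ·) → rt.Pairwise (· ≤ ·) →
    (∀ v ∈ Rm, S.count v ≤ lt.count v ∧ S.count v ≤ rt.count v) →
    ((S.foldl (fun (st : List Int × List Int × Int) l =>
        if l ∈ Rm then (pvRemoveD st.1 l, pvRemoveD st.2.1 l, st.2.2 + 1) else st)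
      (lt, rt, ans)).1.Pairwise (· ≤ ·))
    ∧ ((S.foldl (fun (st : List Int × List Int × Int) l =>
        if l ∈ Rm then (pvRemoveD st.1 l, pvRemoveD st.2.1 l, st.2.2 + 1) else st)
      (lt, rt, ans)).2.1.Pairwise (· ≤ ·))
    ∧ (∀ v, (S.foldl (fun (st : List Int × List Int × Int) l =>
        if l ∈ Rm then (pvRemoveD st.1 l, pvRemoveD st.2.1 l, st.2.2 + 1) else st)
      (lt, rt, ans)).1.count v = lt.count v - (if v ∈ Rm then S.count v else 0))
    ∧ (∀ v, (S.foldl (fun (st : List Int × List Int × Int) l =>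
        if l ∈ Rm then (pvRemoveD st.1 l, pvRemoveD st.2.1 l, st.2.2 + 1) else st)
      (lt, rt, ans)).2.1.count v = rt.count v - (if v ∈ Rm then S.count v else 0))
    ∧ (S.foldl (fun (st : List Int × List Int × Int) l =>
        if l ∈ Rm then (pvRemoveD st.1 l, pvRemoveD st.2.1 l, st.2.2 + 1) else st)
      (lt, rt, ans)).2.2 = ans + (((S.filter (fun x => decide (x ∈ Rm))).length : Int)) := by
  intro S
  induction S with
  | nil =>
    intro lt rt ans hslt hsrt _
    refine ⟨hslt, hsrt, fun v => by simp, fun v => by simp, by simp⟩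
  | cons l S ih =>
    intro lt rt ans hslt hsrt hcap
    simp only [List.foldl_cons]
    by_cases hl : l ∈ Rm
    · have hcapl := hcap l hl
      have hlS : 0 < (l :: S).count l := by simp
      have hllt : l ∈ lt := List.count_pos_iff.mp (by omega)
      have hlrt : l ∈ rt := List.count_pos_iff.mp (by omega)
      rw [if_pos hl, pvRemoveD_mem _ _ hllt, pvRemoveD_mem _ _ hlrt]
      have hcap' : ∀ v ∈ Rm, S.count v ≤ (lt.erase l).count v ∧ S.count v ≤ (rt.erase l).count v := by
        intro v hv
        have := hcap v hv
        by_cases hvl : v = l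
        · subst hvl
          rw [List.count_erase_self, List.count_erase_self]
          simp only [List.count_cons_self] at this
          omega
        · rw [List.count_erase_of_ne hvl, List.count_erase_of_ne hvl]
          have : (l :: S).count v = S.count v := List.count_cons_of_ne (fun h => hvl h.symm)
          have h2 := hcap v hv
          omega
      obtain ⟨p1, p2, p3, p4, p5⟩ := ih (lt.erase l) (rt.erase l) (ans + 1)
        (List.Pairwise.sublist (List.erase_sublist ..) hslt)
        (List.Pairwise.sublist (List.erase_sublist ..) hsrt) hcap'
      refine ⟨p1, p2, ?_, ?_, ?_⟩
      · intro v
        rw [p3 v]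
        by_cases hvl : v = l
        · subst hvl
          rw [List.count_erase_self, if_pos hl, if_pos hl, List.count_cons_self]
          have := (hcap v hl).1
          simp only [List.count_cons_self] at this
          omega
        · rw [List.count_erase_of_ne hvl, List.count_cons_of_ne (fun h => hvl h.symm)]
      · intro v
        rw [p4 v]
        by_cases hvl : v = l
        · subst hvl
          rw [List.count_erase_self, if_pos hl, if_pos hl, List.count_cons_self]
          have := (hcap v hl).2
          simp only [List.count_cons_self] at this
          omega
        · rw [List.count_erase_of_ne hvl, List.count_cons_of_ne (fun h => hvl h.symm)]
      · rw [p5, List.filter_cons, if_pos (by simpa using hl)]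
        simp only [List.length_cons]
        push_cast
        ring
    · rw [if_neg hl]
      have hcap' : ∀ v ∈ Rm, S.count v ≤ lt.count v ∧ S.count v ≤ rt.count v := by
        intro v hv
        have := hcap v hv
        have hne : l ≠ v := fun h => hl (h ▸ hv)
        rw [List.count_cons_of_ne hne] at this
        exact this
      obtain ⟨p1, p2, p3, p4, p5⟩ := ih lt rt ans hslt hsrt hcap'
      refine ⟨p1, p2, ?_, ?_, ?_⟩
      · intro v
        rw [p3 v]
        by_cases hv : v ∈ Rm
        · have hne : l ≠ v := fun h => hl (h ▸ hv)
          rw [if_pos hv, if_pos hv, List.count_cons_of_ne hne]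
        · rw [if_neg hv, if_neg hv]
      · intro v
        rw [p4 v]
        by_cases hv : v ∈ Rm
        · have hne : l ≠ v := fun h => hl (h ▸ hv)
          rw [if_pos hv, if_pos hv, List.count_cons_of_ne hne]
        · rw [if_neg hv, if_neg hv]
      · rw [p5, List.filter_cons, if_neg (by simpa using hl)]

-- B's used/resp loop: resp is a sublist of reserve with the matched copies dropped
theorem uloop (lc : PySem.Dict Int Int) : ∀ (S : List Int) (used : PySem.Dict Int Int) (resp : List Int),
    ∃ K : List Int,
      (S.foldl (fun (st : PySem.Dict Int Int × List Int) r =>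
        if st.1.getD r 0 < lc.getD r 0 then (st.1.insert r (st.1.getD r 0 + 1), st.2)
        else (st.1, st.2 ++ [r])) (used, resp)).2 = resp ++ K
      ∧ K.Sublist S
      ∧ ∀ v, (K.count v : Int) = (S.count v : Int) - min (max (lc.getD v 0 - used.getD v 0) 0) (S.count v : Int) := by
  intro S
  induction S with
  | nil =>
    intro used resp
    refine ⟨[], by simp, List.Sublist.refl _, fun v => by simp⟩
  | cons r S ih =>
    intro used resp
    simp only [List.foldl_cons]
    by_cases hc : used.getD r 0 < lc.getD r 0
    · rw [if_pos hc]
      obtain ⟨K, h1, h2, h3⟩ := ih (used.insert r (used.getD r 0 + 1)) resp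
      refine ⟨K, h1, List.Sublist.cons _ h2, ?_⟩
      intro v
      have := h3 v
      by_cases hv : v = r
      · subst hv
        rw [PySem.Dict.getD_insert_self] at this
        rw [List.count_cons_self]
        push_cast at this ⊢
        omega
      · rw [PySem.Dict.getD_insert_of_ne _ _ _ hv] at this
        rw [List.count_cons_of_ne (fun h => hv h.symm)]
        exact this
    · rw [if_neg hc]
      obtain ⟨K, h1, h2, h3⟩ := ih used (resp ++ [r])
      refine ⟨r :: K, by simpa using h1, List.Sublist.cons₂ _ h2, ?_⟩
      intro v
      have := h3 v
      by_cases hv : v = r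
      · subst hv
        rw [List.count_cons_self, List.count_cons_self]
        push_cast at this ⊢
        omega
      · rw [List.count_cons_of_ne (fun h => hv h.symm), List.count_cons_of_ne (fun h => hv h.symm)]
        exact this

theorem sorted_id_pairwise (xs : List Int) :
    (PySem.List.sorted xs (fun x => x) false).Pairwise (· ≤ ·) := by
  have := PySem.List.sorted_pairwise (xs := xs) (key := fun x => x)
  simpa using this

theorem solution_spec : Claim_equal_solution := by
  intro n lost reserve _ hpre
  unfold Spec_solution solution solution_alt
  simp only []
  set L := PySem.List.sorted lost (fun x => x) false with hL
  set R := PySem.List.sorted reserve (fun x => x) false with hR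
  have hpermL : L.Perm lost := PySem.List.sorted_perm lost (fun x => x) false
  have hpermR : R.Perm reserve := PySem.List.sorted_perm reserve (fun x => x) false
  have hsL : L.Pairwise (· ≤ ·) := sorted_id_pairwise lost
  have hsR : R.Pairwise (· ≤ ·) := sorted_id_pairwise reserve
  -- Pre_ transferred to the sorted copies
  have hcap : ∀ v ∈ R, L.count v ≤ R.count v := by
    intro v hvR
    rw [hpermL.count_eq, hpermR.count_eq]
    have hvres : v ∈ reserve := hpermR.mem_iff.mp hvR
    by_cases hvl : v ∈ lost
    · exact hpre v hvl hvres
    · rw [List.count_eq_zero_of_not_mem hvl]; omega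
  -- phase 1 of A
  obtain ⟨q1, q2, q3, q4, q5⟩ := phase1_inv R L L R (n - (lost.length : Int)) hsL hsR
    (fun v hv => ⟨le_refl _, hcap v hv⟩)
  -- B's lostp
  have hfeq : L.filter (fun l => !(PySem.Set.contains (PySem.Set.ofList R) l))
      = L.filter (fun x => !(decide (x ∈ R))) := by
    apply List.filter_congr
    intro x _
    by_cases hx : x ∈ R
    · simp [hx]
    · simp [hx]
  -- A's lost_tmp equals B's lostp
  have hlostp : (L.foldl (fun (st : List Int × List Int × Int) l =>
        if l ∈ R then (pvRemoveD st.1 l, pvRemoveD st.2.1 l, st.2.2 + 1) else st)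
      (L, R, n - (lost.length : Int))).1 = L.filter (fun x => !(decide (x ∈ R))) := by
    apply List.Perm.eq_of_pairwise (fun a b _ _ hab hba => le_antisymm hab hba) q1
      (List.Pairwise.sublist List.filter_sublist hsL)
    apply List.perm_iff_count.mpr
    intro v
    rw [q3 v]
    by_cases hv : v ∈ R
    · have hz : (L.filter (fun x => !(decide (x ∈ R)))).count v = 0 := by
        apply List.count_eq_zero_of_not_mem
        intro hmem
        have := List.of_mem_filter hmem
        simp [hv] at this
      rw [if_pos hv, hz]
      omega
    · have hz : (L.filter (fun x => !(decide (x ∈ R)))).count v = L.count v :=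
        List.count_filter (by simp [hv])
      rw [if_neg hv, hz]
      omega
  -- B's lc values
  have hlc : ∀ v, (L.foldl (fun (d : PySem.Dict Int Int) l => d.insert l (d.getD l 0 + 1))
      PySem.Dict.empty).getD v 0 = (L.count v : Int) := by
    intro v
    rw [PySem.Dict.getD_foldl_insert_add_one]
    simp [PySem.Dict.getD_empty]
  -- B's resp
  obtain ⟨K, k1, k2, k3⟩ := uloop (L.foldl (fun (d : PySem.Dict Int Int) l =>
      d.insert l (d.getD l 0 + 1)) PySem.Dict.empty) R PySem.Dict.empty []
  -- A's reserve_tmp equals B's resp (= K)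
  have hresp : (L.foldl (fun (st : List Int × List Int × Int) l =>
        if l ∈ R then (pvRemoveD st.1 l, pvRemoveD st.2.1 l, st.2.2 + 1) else st)
      (L, R, n - (lost.length : Int))).2.1 = K := by
    apply List.Perm.eq_of_pairwise (fun a b _ _ hab hba => le_antisymm hab hba) q2
      (List.Pairwise.sublist k2 hsR)
    apply List.perm_iff_count.mpr
    intro v
    have hkv := k3 v
    rw [hlc v, PySem.Dict.getD_empty] at hkv
    rw [q4 v]
    by_cases hv : v ∈ R
    · have hle := hcap v hv
      rw [if_pos hv]
      omega
    · rw [if_neg hv, List.count_eq_zero_of_not_mem hv]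
      have hR0 : R.count v = 0 := List.count_eq_zero_of_not_mem hv
      rw [hR0] at hkv
      omega
  -- answers line up: n - len(lost) + |matched in phase 1| = n - |lostp|
  have hans : (L.foldl (fun (st : List Int × List Int × Int) l =>
        if l ∈ R then (pvRemoveD st.1 l, pvRemoveD st.2.1 l, st.2.2 + 1) else st)
      (L, R, n - (lost.length : Int))).2.2
      = n - ((L.filter (fun x => !(decide (x ∈ R)))).length : Int) := by
    rw [q5]
    have hsplit : (L.filter (fun x => decide (x ∈ R))).length
        + (L.filter (fun x => !(decide (x ∈ R)))).length = L.length := by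
      have := (List.filter_append_perm (fun x => decide (x ∈ R)) L).length_eq
      simpa using this
    have hlenL : L.length = lost.length := hpermL.length_eq
    omega
  -- phase 2 of A is the two-pointer merge
  rw [hfeq]
  rw [hlostp, hresp, hans, k1, List.nil_append]
  apply phase2_eq_twoPtr
  · exact List.Pairwise.sublist List.filter_sublist hsL
  · exact List.Pairwise.sublist k2 hsR
  · intro x hx hmem
    have hxnotR := List.of_mem_filter hx
    simp only [Bool.not_eq_eq_eq_not, Bool.not_true, decide_eq_false_iff_not] at hxnotR
    exact hxnotR (k2.mem hmem)
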